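-- pv_equiv track=rewrite | github.com/amcc1996/advent-of-code-2024 | day21/main_old_v2.py | parse_num_code
-- ===== SOURCE A (Python) =====
-- def parse_num_code(code, map_number_and_position_to_directions):
--     sequence_list = ['']
--     start_pos = 'A'
--     for char in code:
--         parsed_code = map_number_and_position_to_directions[char][start_pos]
--         aux = []
--         for sequence in sequence_list:
--             for parsed in parsed_code:
--                 aux.append(sequence + parsed)
--         sequence_list = [x for x in aux]
--         start_pos = char
--
--     return sequence_list
-- ===== SOURCE B (Python) =====
-- def parse_num_code(code, map_number_and_position_to_directions):
--     parts = []
--     prev = 'A'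
--     for ch in code:
--         parts.append(map_number_and_position_to_directions[ch][prev])
--         prev = ch
--     total = 1
--     for p in parts:
--         total *= len(p)
--     result = []
--     for i in range(total):
--         combo = []
--         rem = i
--         for p in reversed(parts):
--             rem, d = divmod(rem, len(p))
--             combo.append(p[d])
--         result.append(''.join(reversed(combo)))
--     return result
-- ===== Notes on version B (the rewrite author's own statement) =====
-- stated objective: alternative
-- what changed: B gathers the per-character option lists in one pass, computes the total count as the product of their lengths, and then materialises each output string by mixed-radix decoding of its rank (divmod over the reversed option-list lengths), instead of A's repeatedly cross-joined and rebuilt accumulator list.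
import Mathlib
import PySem

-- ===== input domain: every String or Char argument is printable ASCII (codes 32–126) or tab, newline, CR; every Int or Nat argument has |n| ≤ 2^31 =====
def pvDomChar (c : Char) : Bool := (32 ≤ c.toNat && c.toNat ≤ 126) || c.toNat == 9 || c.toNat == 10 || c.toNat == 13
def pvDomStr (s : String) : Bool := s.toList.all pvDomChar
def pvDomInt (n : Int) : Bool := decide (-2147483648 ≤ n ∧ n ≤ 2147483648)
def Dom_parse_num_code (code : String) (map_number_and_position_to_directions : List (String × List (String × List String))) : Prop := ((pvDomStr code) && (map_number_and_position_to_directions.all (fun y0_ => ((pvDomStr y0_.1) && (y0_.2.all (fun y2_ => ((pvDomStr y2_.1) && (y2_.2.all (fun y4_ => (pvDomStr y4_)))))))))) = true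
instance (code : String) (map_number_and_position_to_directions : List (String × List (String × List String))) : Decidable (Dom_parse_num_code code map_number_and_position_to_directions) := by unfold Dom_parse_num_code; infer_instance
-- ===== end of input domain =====

-- B replaces A's per-character cross-join of a rebuilt accumulator by a count-then-decode scheme:
-- gather the option lists, multiply their lengths, and build the i-th output string by mixed-radix
-- decoding of i (alternative algorithm; same total cost).

-- shared lookup helper: map[char][start_pos] on the association lists (first match, as Python dict)
def pvLookup? (m : List (String × List (String × List String))) (c : String) (pos : String) : Option (List String) :=
  (List.lookup c m).bind (fun d => List.lookup pos d)

-- ===== PORT A =====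
-- the loop body of A on state (sequence_list, start_pos); lookup failure (Python KeyError) is outside Pre_
def pvStepA (m : List (String × List (String × List String))) (st : List String × String) (char : Char) : List String × String :=
  let c := String.singleton char
  let parsed_code := (pvLookup? m c st.2).getD []
  let aux := st.1.foldl (fun aux sequence => parsed_code.foldl (fun aux parsed => aux ++ [sequence ++ parsed]) aux) []
  (aux.map (fun x => x), c)   -- 'sequence_list = [x for x in aux]'

def parse_num_code (code : String) (map_number_and_position_to_directions : List (String × List (String × List String))) : List String :=
  (code.toList.foldl (pvStepA map_number_and_position_to_directions) ([""], "A")).1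

-- ===== PORT B =====
-- phase 1 of B: the 'parts.append(map[ch][prev]); prev = ch' loop
def pvGather (m : List (String × List (String × List String))) : List Char → String → List (List String)
  | [], _ => []
  | ch :: rest, pos => (pvLookup? m (String.singleton ch) pos).getD [] :: pvGather m rest (String.singleton ch)

-- phase 3 of B, inner loop: 'for p in reversed(parts): rem, d = divmod(rem, len(p)); combo.append(p[d])'
-- (applied to parts.reverse); divmod by 0 / index errors are unreachable when the range loop runs,
-- so the total defaults ('getD') are never taken on executed inputs
def pvDecode : List (List String) → Int → List String
  | [], _ => []
  | p :: rest, rem =>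
      PySem.List.pyGetD p (PySem.Int.mod rem (p.length : Int)) ""
        :: pvDecode rest (PySem.Int.floordiv rem (p.length : Int))

def parse_num_code_alt (code : String) (map_number_and_position_to_directions : List (String × List (String × List String))) : List String :=
  let parts := pvGather map_number_and_position_to_directions code.toList "A"
  let total := parts.foldl (fun t p => t * (p.length : Int)) 1
  (PySem.List.pyRange 0 total 1).map
    (fun i => PySem.Str.join "" ((pvDecode parts.reverse i).reverse))   -- ''.join(reversed(combo))

-- ===== PRECONDITION & SPEC =====
-- Pre_ excludes exactly the inputs where A raises KeyError: some code character (or the previous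
-- character used as start position, initially "A") is missing from the nested dicts.
def Pre_parse_num_code (code : String) (map_number_and_position_to_directions : List (String × List (String × List String))) : Prop :=
  (let ks := code.toList.map String.singleton
   (ks.zip ("A" :: ks)).all (fun cp => (pvLookup? map_number_and_position_to_directions cp.1 cp.2).isSome)) = true
instance (code : String) (map_number_and_position_to_directions : List (String × List (String × List String))) : Decidable (Pre_parse_num_code code map_number_and_position_to_directions) := by unfold Pre_parse_num_code; infer_instance

def pvWitness_parse_num_code : String × (List (String × List (String × List String))) :=
  ("12", [("1", [("A", ["<v", "v<"])]), ("2", [("1", [">"]), ("A", ["v"])])])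

def Spec_parse_num_code (code : String) (map_number_and_position_to_directions : List (String × List (String × List String))) (out : List String) : Prop := out = parse_num_code_alt code map_number_and_position_to_directions
instance (code : String) (map_number_and_position_to_directions : List (String × List (String × List String))) (out : List String) : Decidable (Spec_parse_num_code code map_number_and_position_to_directions out) := by unfold Spec_parse_num_code; infer_instance

-- ===== CLAIM =====
def Claim_equal_parse_num_code : Prop := ∀ (code : String) (map_number_and_position_to_directions : List (String × List (String × List String))), Dom_parse_num_code code map_number_and_position_to_directions → Pre_parse_num_code code map_number_and_position_to_directions → Spec_parse_num_code code map_number_and_position_to_directions (parse_num_code code map_number_and_position_to_directions)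

-- ===== LEMMAS AND PROOFS =====

-- proof-side characterisation of A: the ordered Cartesian product of the option lists
def pvProduct : List (List String) → List String
  | [] => [""]
  | opts :: rest => opts.flatMap (fun x => (pvProduct rest).map (fun t => x ++ t))

-- A's loop from any state computes the cross of the accumulator with the product of the remaining parts
theorem pvLoopA_eq (m : List (String × List (String × List String))) :
    ∀ (chars : List Char) (seqs : List String) (pos : String),
      (chars.foldl (pvStepA m) (seqs, pos)).1
        = seqs.flatMap (fun s => (pvProduct (pvGather m chars pos)).map (fun t => s ++ t)) := by
  intro chars
  induction chars with
  | nil =>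
      intro seqs pos
      simp [pvGather, pvProduct]
  | cons c rest ih =>
      intro seqs pos
      have hstep : pvStepA m (seqs, pos) c
          = (seqs.flatMap (fun s => ((pvLookup? m (String.singleton c) pos).getD []).map (fun p => s ++ p)),
             String.singleton c) := by
        simp only [pvStepA, PySem.List.foldl_append_singleton_eq_map,
          PySem.List.foldl_append_eq_flatMap, List.map_id_fun', id]
        simp
      simp only [List.foldl_cons, hstep, ih, pvGather, pvProduct, List.flatMap_assoc,
        List.map_flatMap, List.flatMap_map]
      congr 1; funext s; congr 1; funext p
      simp [List.map_map, Function.comp, String.append_assoc]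

theorem pvIntercalate_nil (l : List (List Char)) : List.intercalate [] l = l.flatten := by
  induction l with
  | nil => simp [List.intercalate]
  | cons p r ih =>
    cases r with
    | nil => simp [List.intercalate]
    | cons q r' => rw [List.intercalate] at ih ⊢; simp_all [List.intersperse]

theorem pvJoin_append_singleton (xs : List String) (y : String) :
    PySem.Str.join "" (xs ++ [y]) = PySem.Str.join "" xs ++ y := by
  simp [PySem.Str.join, PySem.Chars.join, pvIntercalate_nil, String.ofList_toList]

-- the int product accumulator of B equals the Nat product of the lengths
theorem pvFoldTotal : ∀ (ps : List (List String)) (a : Int),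
    ps.foldl (fun t p => t * (p.length : Int)) a = a * (((ps.map List.length).prod : Nat) : Int) := by
  intro ps
  induction ps with
  | nil => intro a; simp
  | cons p r ih => intro a; simp [ih]; ring

theorem pvRangeMul (n L : Nat) :
    List.range (n * L) = (List.range n).flatMap (fun q => (List.range L).map (fun r => q * L + r)) := by
  induction n with
  | zero => simp
  | succ n ih =>
      have : (n + 1) * L = n * L + L := by ring
      rw [this, List.range_add, List.range_succ, List.flatMap_append, ← ih]
      simp

theorem pvDecode_cons (p : List String) (rs : List (List String)) (q r : Nat) (hr : r < p.length) :
    pvDecode (p :: rs) (((q * p.length + r : Nat) : Int)) = p.getD r "" :: pvDecode rs ((q : Nat) : Int) := by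
  have hL : 0 < p.length := Nat.lt_of_le_of_lt (Nat.zero_le r) hr
  simp only [pvDecode, PySem.Int.mod_natCast, PySem.Int.floordiv_natCast, PySem.List.pyGetD_natCast]
  congr 2
  · rw [Nat.mul_comm q p.length, Nat.mul_add_mod, Nat.mod_eq_of_lt hr]
  · rw [Nat.mul_comm q p.length, Nat.mul_add_div hL, Nat.div_eq_of_lt hr, Nat.add_zero]

theorem pvMapEqRange (p : List String) (g : String → String) :
    p.map g = (List.range p.length).map (fun r => g (p.getD r "")) := by
  induction p with
  | nil => simp
  | cons x t ih =>
      simp only [List.map_cons, List.length_cons, List.range_succ_eq_map, List.map_map]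
      exact congrArg₂ _ rfl (by rw [ih]; apply List.map_congr_left; intro a _; simp [Nat.succ_eq_add_one])

theorem pvProdAppend : ∀ (xs : List (List String)) (p : List String),
    pvProduct (xs ++ [p]) = (pvProduct xs).flatMap (fun t => p.map (fun x => t ++ x)) := by
  intro xs
  induction xs with
  | nil => intro p; simp [pvProduct]
  | cons o r ih =>
      intro p
      simp only [List.cons_append, pvProduct, ih, List.flatMap_assoc, List.map_flatMap, List.flatMap_map]
      congr 1; funext x; congr 1; funext t
      simp [List.map_map, Function.comp, String.append_assoc]

-- the enumeration view: the product of rs.reverse, listed in order, is the mixed-radix decode of the rank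
theorem pvProdEnum : ∀ (rs : List (List String)),
    pvProduct rs.reverse
      = (List.range ((rs.map List.length).prod)).map
          (fun k => PySem.Str.join "" ((pvDecode rs ((k : Nat) : Int)).reverse)) := by
  intro rs
  induction rs with
  | nil =>
      simp only [List.reverse_nil, pvProduct, List.map_nil, List.prod_nil, List.range_one, List.map_cons,
        List.map_nil]
      decide
  | cons p rs ih =>
      have key : ∀ q : Nat, (List.range p.length).map
            (fun r => PySem.Str.join "" ((pvDecode (p :: rs) ((q * p.length + r : Nat) : Int)).reverse))
          = p.map (fun x => PySem.Str.join "" ((pvDecode rs ((q : Nat) : Int)).reverse) ++ x) := by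
        intro q
        rw [pvMapEqRange p (fun x => PySem.Str.join "" ((pvDecode rs ((q : Nat) : Int)).reverse) ++ x)]
        apply List.map_congr_left
        intro r hr
        rw [pvDecode_cons p rs q r (List.mem_range.mp hr), List.reverse_cons, pvJoin_append_singleton]
      calc pvProduct ((p :: rs).reverse)
          = pvProduct (rs.reverse ++ [p]) := by simp
        _ = (pvProduct rs.reverse).flatMap (fun t => p.map (fun x => t ++ x)) := pvProdAppend _ _
        _ = (List.range ((rs.map List.length).prod)).flatMap
              (fun q => p.map (fun x => PySem.Str.join "" ((pvDecode rs ((q : Nat) : Int)).reverse) ++ x)) := by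
              rw [ih, List.flatMap_map]
        _ = (List.range (((p :: rs).map List.length).prod)).map
              (fun k => PySem.Str.join "" ((pvDecode (p :: rs) ((k : Nat) : Int)).reverse)) := by
              simp only [List.map_cons, List.prod_cons, Nat.mul_comm p.length, pvRangeMul,
                List.map_flatMap, List.map_map]
              congr 1; funext q
              rw [← key q]; rfl

-- ===== VERDICT =====
theorem parse_num_code_spec : Claim_equal_parse_num_code := by
  intro code m _ _
  unfold Spec_parse_num_code parse_num_code parse_num_code_alt
  rw [pvLoopA_eq]
  simp only [List.flatMap_cons, List.flatMap_nil, List.append_nil, String.empty_append,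
    List.map_id_fun', id]
  have h1 : pvProduct (pvGather m code.toList "A")
      = pvProduct ((pvGather m code.toList "A").reverse.reverse) := by simp
  rw [h1, pvProdEnum ((pvGather m code.toList "A").reverse), pvFoldTotal, one_mul,
    PySem.List.pyRange_zero_nat, List.map_map]
  simp [List.map_reverse, List.prod_reverse, Function.comp]
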